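-- pv_equiv track=rewrite | github.com/fivetran/api_framework | examples/pipelines/EHI/dev/v2/connector_v2.py | categorize_and_sort_tables
-- ===== SOURCE A (Python) =====
-- from typing import Dict, List, Any, Optional, Tuple
--
-- SMALL_TABLE_THRESHOLD = 1000000  # 1M rows
--
-- LARGE_TABLE_THRESHOLD = 100000000  # 100M rows
--
-- def categorize_and_sort_tables(tables: List[str], table_sizes: Dict[str, int]) -> List[Tuple[str, str, int]]:
--     """Categorize tables by size and sort for optimal processing order (small first)."""
--     categorized = []
--     for table in tables:
--         row_count = table_sizes.get(table, 0)
--         if row_count < SMALL_TABLE_THRESHOLD: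
--             category = 'small'
--         elif row_count < LARGE_TABLE_THRESHOLD:
--             category = 'medium'
--         else:
--             category = 'large'
--         categorized.append((table, category, row_count))
--
--     # Sort by category (small first, then medium, then large) and by row count within each category
--     categorized.sort(key=lambda x: ('small', 'medium', 'large').index(x[1]) * 1000000000 + x[2])
--     return categorized
-- ===== SOURCE B (Python) =====
-- SMALL_TABLE_THRESHOLD = 1000000  # 1M rows
-- LARGE_TABLE_THRESHOLD = 100000000  # 100M rows
--
-- def categorize_and_sort_tables(tables, table_sizes):
--     """Partition tables into small/medium/large buckets in one pass, sort each
--     bucket by row count (stable), and concatenate small + medium + large."""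
--     small, medium, large = [], [], []
--     for table in tables:
--         row_count = table_sizes.get(table, 0)
--         if row_count < SMALL_TABLE_THRESHOLD:
--             small.append((table, 'small', row_count))
--         elif row_count < LARGE_TABLE_THRESHOLD:
--             medium.append((table, 'medium', row_count))
--         else:
--             large.append((table, 'large', row_count))
--     by_count = lambda x: x[2]
--     return sorted(small, key=by_count) + sorted(medium, key=by_count) + sorted(large, key=by_count)
-- ===== Notes on version B (the rewrite author's own statement) =====
-- stated objective: alternative
-- what changed: A builds one list and sorts it once by a composite key (category index * 10^9 + row count); B partitions the tables into three category buckets in the same single pass, stably sorts each bucket by row count alone, and concatenates small + medium + large.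
import Mathlib
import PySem

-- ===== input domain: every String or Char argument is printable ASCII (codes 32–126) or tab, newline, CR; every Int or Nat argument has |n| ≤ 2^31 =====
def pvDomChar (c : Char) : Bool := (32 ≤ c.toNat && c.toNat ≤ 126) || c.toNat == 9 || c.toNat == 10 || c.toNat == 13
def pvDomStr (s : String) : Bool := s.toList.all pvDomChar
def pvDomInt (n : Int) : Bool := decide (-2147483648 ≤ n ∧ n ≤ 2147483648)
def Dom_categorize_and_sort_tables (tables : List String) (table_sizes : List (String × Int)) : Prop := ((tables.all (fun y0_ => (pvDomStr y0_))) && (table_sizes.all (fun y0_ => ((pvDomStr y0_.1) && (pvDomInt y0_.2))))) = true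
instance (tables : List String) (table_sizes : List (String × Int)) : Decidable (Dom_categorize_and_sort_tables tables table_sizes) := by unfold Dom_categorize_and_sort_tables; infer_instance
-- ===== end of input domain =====

-- B replaces A's single sort with an encoded composite key by a one-pass partition into three
-- category buckets, a stable row-count sort of each bucket, and concatenation (objective: alternative,
-- same asymptotic cost). A sorts its local list in place; both ports are about the return value only.

-- ===== PORT A =====
def categorize_and_sort_tables (tables : List String) (table_sizes : List (String × Int)) : List (String × String × Int) :=
  -- 'for table in tables: … categorized.append((table, category, row_count))'
  let categorized := tables.foldl (fun acc table =>
    let row_count := PySem.Dict.getD (PySem.Dict.mk table_sizes) table 0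
    let category := if row_count < 1000000 then "small"
      else if row_count < 100000000 then "medium" else "large"
    acc ++ [(table, category, row_count)]) []
  -- 'categorized.sort(key=lambda x: ("small","medium","large").index(x[1]) * 1000000000 + x[2])'
  -- tuple.index raises ValueError when absent; x[1] is always one of the three, so '.getD 0' is unreachable.
  PySem.List.sorted categorized
    (fun x => (((PySem.List.index? ["small", "medium", "large"] x.2.1).getD 0 : Nat) : Int) * 1000000000 + x.2.2) false

-- ===== PORT B =====
def categorize_and_sort_tables_alt (tables : List String) (table_sizes : List (String × Int)) : List (String × String × Int) :=
  -- one pass appending into (small, medium, large) buckets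
  let buckets := tables.foldl
    (fun (acc : List (String × String × Int) × List (String × String × Int) × List (String × String × Int)) table =>
      let row_count := PySem.Dict.getD (PySem.Dict.mk table_sizes) table 0
      if row_count < 1000000 then (acc.1 ++ [(table, "small", row_count)], acc.2.1, acc.2.2)
      else if row_count < 100000000 then (acc.1, acc.2.1 ++ [(table, "medium", row_count)], acc.2.2)
      else (acc.1, acc.2.1, acc.2.2 ++ [(table, "large", row_count)])) ([], [], [])
  -- 'sorted(small, key=by_count) + sorted(medium, key=by_count) + sorted(large, key=by_count)'
  PySem.List.sorted buckets.1 (fun x => x.2.2) false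
    ++ PySem.List.sorted buckets.2.1 (fun x => x.2.2) false
    ++ PySem.List.sorted buckets.2.2 (fun x => x.2.2) false

-- ===== PRECONDITION & SPEC =====
def Spec_categorize_and_sort_tables (tables : List String) (table_sizes : List (String × Int)) (out : List (String × String × Int)) : Prop := out = categorize_and_sort_tables_alt tables table_sizes
instance (tables : List String) (table_sizes : List (String × Int)) (out : List (String × String × Int)) : Decidable (Spec_categorize_and_sort_tables tables table_sizes out) := by unfold Spec_categorize_and_sort_tables; infer_instance

-- ===== CLAIM (what is proved, stated in full; the proofs are below) =====
def Claim_equal_categorize_and_sort_tables : Prop := ∀ (tables : List String) (table_sizes : List (String × Int)), Dom_categorize_and_sort_tables tables table_sizes → Spec_categorize_and_sort_tables tables table_sizes (categorize_and_sort_tables tables table_sizes)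

-- ===== LEMMAS AND PROOFS =====

-- proof-side abbreviations
def pvCatOf (rc : Int) : String :=
  if rc < 1000000 then "small" else if rc < 100000000 then "medium" else "large"

def pvEnr (ts : List (String × Int)) (t : String) : String × String × Int :=
  (t, pvCatOf (PySem.Dict.getD (PySem.Dict.mk ts) t 0), PySem.Dict.getD (PySem.Dict.mk ts) t 0)

def pvKeyA (x : String × String × Int) : Int :=
  (((PySem.List.index? ["small", "medium", "large"] x.2.1).getD 0 : Nat) : Int) * 1000000000 + x.2.2

def pvGood (x : String × String × Int) : Bool := x.2.1 == pvCatOf x.2.2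
def pvIsS (x : String × String × Int) : Bool := x.2.1 == "small"
def pvIsM (x : String × String × Int) : Bool := x.2.1 == "medium"
def pvIsL (x : String × String × Int) : Bool := x.2.1 == "large"

-- insertBy into a separated concatenation
lemma insertBy_append_of_all_before {α : Type} (before : α → α → Bool) (x : α) (A B : List α)
    (hB : ∀ b ∈ B, before x b = true) :
    PySem.List.insertBy before x (A ++ B) = PySem.List.insertBy before x A ++ B := by
  induction A with
  | nil =>
    cases B with
    | nil => rfl
    | cons b bs => simp [PySem.List.insertBy, hB b (by simp)]
  | cons a as ih =>
    by_cases h : before x a = true <;>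
      simp [PySem.List.insertBy, h, ih]

lemma insertBy_append_of_all_not_before {α : Type} (before : α → α → Bool) (x : α) (A B : List α)
    (hA : ∀ a ∈ A, before x a = false) :
    PySem.List.insertBy before x (A ++ B) = A ++ PySem.List.insertBy before x B := by
  induction A with
  | nil => rfl
  | cons a as ih =>
    simp [PySem.List.insertBy, hA a (by simp), ih (fun a' ha' => hA a' (by simp [ha']))]

lemma insertBy_congr_mem {α : Type} (b1 b2 : α → α → Bool) (x : α) (ys : List α)
    (h : ∀ y ∈ ys, b1 x y = b2 x y) :
    PySem.List.insertBy b1 x ys = PySem.List.insertBy b2 x ys := by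
  induction ys with
  | nil => rfl
  | cons y ys ih =>
    by_cases hy : b1 x y = true <;>
      simp [PySem.List.insertBy, hy, h y (by simp) ▸ hy, ih (fun y' hy' => h y' (by simp [hy']))]

-- the insertion-sort fold splits over a key-separated partition
lemma foldl_insertBy_partition {α : Type} (before : α → α → Bool) (p g : α → Bool)
    (hT : ∀ a b, g a = true → g b = true → p a = true → p b = false → before a b = true)
    (hF : ∀ a b, g a = true → g b = true → p a = true → p b = false → before b a = false) :
    ∀ (xs A B : List α), (∀ x ∈ xs, g x = true) →
      (∀ a ∈ A, g a = true ∧ p a = true) → (∀ b ∈ B, g b = true ∧ p b = false) →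
      xs.foldl (fun acc x => PySem.List.insertBy before x acc) (A ++ B)
        = (xs.filter p).foldl (fun acc x => PySem.List.insertBy before x acc) A
          ++ (xs.filter (fun x => !p x)).foldl (fun acc x => PySem.List.insertBy before x acc) B := by
  intro xs
  induction xs with
  | nil => intro A B _ _ _; rfl
  | cons x xs ih =>
    intro A B hxs hA hB
    have hgx : g x = true := hxs x (by simp)
    by_cases hp : p x = true
    · have hins : PySem.List.insertBy before x (A ++ B) = PySem.List.insertBy before x A ++ B :=
        insertBy_append_of_all_before before x A B
          (fun b hb => hT x b hgx (hB b hb).1 hp (hB b hb).2)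
      have hA' : ∀ a ∈ PySem.List.insertBy before x A, g a = true ∧ p a = true := by
        intro a ha
        rcases (PySem.List.mem_insertBy _ _ _ _).1 ha with rfl | ha'
        · exact ⟨hgx, hp⟩
        · exact hA a ha'
      simp only [List.foldl_cons, hins, List.filter_cons, hp]
      rw [ih (PySem.List.insertBy before x A) B (fun y hy => hxs y (by simp [hy])) hA' hB]
      simp
    · have hp' : p x = false := by simpa using hp
      have hins : PySem.List.insertBy before x (A ++ B) = A ++ PySem.List.insertBy before x B :=
        insertBy_append_of_all_not_before before x A B
          (fun a ha => hF a x (hA a ha).1 hgx (hA a ha).2 hp')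
      have hB' : ∀ b ∈ PySem.List.insertBy before x B, g b = true ∧ p b = false := by
        intro b hb
        rcases (PySem.List.mem_insertBy _ _ _ _).1 hb with rfl | hb'
        · exact ⟨hgx, hp'⟩
        · exact hB b hb'
      simp only [List.foldl_cons, hins, List.filter_cons, hp']
      rw [ih A (PySem.List.insertBy before x B) (fun y hy => hxs y (by simp [hy])) hA hB']
      simp

lemma sorted_partition {α : Type} (xs : List α) (key : α → Int) (p g : α → Bool)
    (hg : ∀ x ∈ xs, g x = true)
    (hsep : ∀ a b, g a = true → g b = true → p a = true → p b = false → key a < key b) :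
    PySem.List.sorted xs key false
      = PySem.List.sorted (xs.filter p) key false
        ++ PySem.List.sorted (xs.filter (fun x => !p x)) key false := by
  rw [PySem.List.sorted_eq_foldl_insertBy, PySem.List.sorted_eq_foldl_insertBy,
    PySem.List.sorted_eq_foldl_insertBy]
  exact foldl_insertBy_partition _ p g
    (fun a b ga gb pa pb => by simp [hsep a b ga gb pa pb])
    (fun a b ga gb pa pb => by simp [Int.not_lt.2 (le_of_lt (hsep a b ga gb pa pb))])
    xs [] [] hg (by simp) (by simp)

-- the insertion-sort fold only looks at key comparisons, so two keys ordering the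
-- elements identically give the same sort
lemma foldl_insertBy_key_congr {α : Type} (k1 k2 : α → Int) (g : α → Bool)
    (h : ∀ a b, g a = true → g b = true → (k1 a < k1 b ↔ k2 a < k2 b)) :
    ∀ (xs acc : List α), (∀ x ∈ xs, g x = true) → (∀ a ∈ acc, g a = true) →
      xs.foldl (fun acc x => PySem.List.insertBy (fun a b => decide (k1 a < k1 b)) x acc) acc
        = xs.foldl (fun acc x => PySem.List.insertBy (fun a b => decide (k2 a < k2 b)) x acc) acc := by
  intro xs
  induction xs with
  | nil => intro acc _ _; rfl
  | cons x xs ih =>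
    intro acc hxs hacc
    have hgx : g x = true := hxs x (by simp)
    have hcongr : PySem.List.insertBy (fun a b => decide (k1 a < k1 b)) x acc
        = PySem.List.insertBy (fun a b => decide (k2 a < k2 b)) x acc :=
      insertBy_congr_mem _ _ x acc (fun y hy => by
        simp only [decide_eq_decide]; exact h x y hgx (hacc y hy))
    have hacc' : ∀ a ∈ PySem.List.insertBy (fun a b => decide (k2 a < k2 b)) x acc, g a = true := by
      intro a ha
      rcases (PySem.List.mem_insertBy _ _ _ _).1 ha with rfl | ha'
      · exact hgx
      · exact hacc a ha'
    simp only [List.foldl_cons, hcongr]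
    exact ih _ (fun y hy => hxs y (by simp [hy])) hacc'

lemma sorted_key_congr {α : Type} (xs : List α) (k1 k2 : α → Int) (g : α → Bool)
    (hg : ∀ x ∈ xs, g x = true)
    (h : ∀ a b, g a = true → g b = true → (k1 a < k1 b ↔ k2 a < k2 b)) :
    PySem.List.sorted xs k1 false = PySem.List.sorted xs k2 false := by
  rw [PySem.List.sorted_eq_foldl_insertBy, PySem.List.sorted_eq_foldl_insertBy]
  exact foldl_insertBy_key_congr k1 k2 g h xs [] hg (by simp)

-- category / key facts
lemma keyA_small {x : String × String × Int} (h : pvIsS x = true) : pvKeyA x = x.2.2 := by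
  have : x.2.1 = "small" := by simpa [pvIsS] using h
  simp [pvKeyA, this]

lemma keyA_medium {x : String × String × Int} (h : pvIsM x = true) :
    pvKeyA x = 1000000000 + x.2.2 := by
  have hx : x.2.1 = "medium" := by simpa [pvIsM] using h
  have h1 : (List.idxOf? "medium" ["small", "medium", "large"]).getD 0 = 1 := by decide
  simp [pvKeyA, hx, h1]

lemma keyA_large {x : String × String × Int} (h : pvIsL x = true) :
    pvKeyA x = 2000000000 + x.2.2 := by
  have hx : x.2.1 = "large" := by simpa [pvIsL] using h
  have h1 : (List.idxOf? "large" ["small", "medium", "large"]).getD 0 = 2 := by decide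
  simp [pvKeyA, hx, h1]

lemma good_small {x : String × String × Int} (hg : pvGood x = true) (h : pvIsS x = true) :
    x.2.2 < 1000000 := by
  have hc : x.2.1 = pvCatOf x.2.2 := by simpa [pvGood] using hg
  have hs : x.2.1 = "small" := by simpa [pvIsS] using h
  by_contra hlt
  simp [pvCatOf, hlt] at hc
  rw [hs] at hc
  split_ifs at hc <;> simp_all

lemma good_medium {x : String × String × Int} (hg : pvGood x = true) (h : pvIsM x = true) :
    1000000 ≤ x.2.2 ∧ x.2.2 < 100000000 := by
  have hc : x.2.1 = pvCatOf x.2.2 := by simpa [pvGood] using hg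
  have hm : x.2.1 = "medium" := by simpa [pvIsM] using h
  rw [hm] at hc
  unfold pvCatOf at hc
  split_ifs at hc with h1 h2 <;> simp_all

lemma good_large {x : String × String × Int} (hg : pvGood x = true) (h : pvIsL x = true) :
    100000000 ≤ x.2.2 := by
  have hc : x.2.1 = pvCatOf x.2.2 := by simpa [pvGood] using hg
  have hm : x.2.1 = "large" := by simpa [pvIsL] using h
  rw [hm] at hc
  unfold pvCatOf at hc
  split_ifs at hc with h1 h2 <;> simp_all

lemma good_cases {x : String × String × Int} (hg : pvGood x = true) :
    pvIsS x = true ∨ pvIsM x = true ∨ pvIsL x = true := by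
  have hc : x.2.1 = pvCatOf x.2.2 := by simpa [pvGood] using hg
  unfold pvCatOf at hc
  split_ifs at hc <;> simp [pvIsS, pvIsM, pvIsL, hc]

lemma medium_not_small {x : String × String × Int} (h : pvIsM x = true) : pvIsS x = false := by
  have : x.2.1 = "medium" := by simpa [pvIsM] using h
  simp [pvIsS, this]

-- A's fold builds the enriched list
lemma catA_eq_map (tables : List String) (ts : List (String × Int)) :
    tables.foldl (fun acc table =>
      acc ++ [(table, if PySem.Dict.getD (PySem.Dict.mk ts) table 0 < 1000000 then "small"
        else if PySem.Dict.getD (PySem.Dict.mk ts) table 0 < 100000000 then "medium" else "large",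
        PySem.Dict.getD (PySem.Dict.mk ts) table 0)]) []
      = tables.map (pvEnr ts) := by
  have := PySem.List.foldl_append_singleton_eq_map (l := tables) (f := pvEnr ts) (acc := [])
  simpa [pvEnr, pvCatOf] using this

lemma good_of_mem_map {ts : List (String × Int)} {tables : List String}
    {x : String × String × Int} (hx : x ∈ tables.map (pvEnr ts)) : pvGood x = true := by
  rcases List.mem_map.1 hx with ⟨t, _, rfl⟩
  simp [pvGood, pvEnr]

-- B's fold builds the three filtered buckets
lemma buckets_eq (ts : List (String × Int)) :
    ∀ (tables : List String)
      (acc : List (String × String × Int) × List (String × String × Int) × List (String × String × Int)),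
      tables.foldl (fun acc table =>
        if PySem.Dict.getD (PySem.Dict.mk ts) table 0 < 1000000 then (acc.1 ++ [(table, "small", PySem.Dict.getD (PySem.Dict.mk ts) table 0)], acc.2.1, acc.2.2)
        else if PySem.Dict.getD (PySem.Dict.mk ts) table 0 < 100000000 then (acc.1, acc.2.1 ++ [(table, "medium", PySem.Dict.getD (PySem.Dict.mk ts) table 0)], acc.2.2)
        else (acc.1, acc.2.1, acc.2.2 ++ [(table, "large", PySem.Dict.getD (PySem.Dict.mk ts) table 0)])) acc
      = (acc.1 ++ (tables.map (pvEnr ts)).filter pvIsS,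
         acc.2.1 ++ (tables.map (pvEnr ts)).filter pvIsM,
         acc.2.2 ++ (tables.map (pvEnr ts)).filter pvIsL) := by
  intro tables
  induction tables with
  | nil => intro acc; simp
  | cons t tables ih =>
    intro acc
    by_cases h1 : PySem.Dict.getD (PySem.Dict.mk ts) t 0 < 1000000
    · simp only [List.foldl_cons, if_pos h1, ih, List.map_cons, List.filter_cons]
      simp [pvEnr, pvCatOf, pvIsS, pvIsM, pvIsL, h1]
    · by_cases h2 : PySem.Dict.getD (PySem.Dict.mk ts) t 0 < 100000000
      · simp only [List.foldl_cons, if_neg h1, if_pos h2, ih, List.map_cons, List.filter_cons]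
        simp [pvEnr, pvCatOf, pvIsS, pvIsM, pvIsL, h1, h2]
      · simp only [List.foldl_cons, if_neg h1, if_neg h2, ih, List.map_cons, List.filter_cons]
        simp [pvEnr, pvCatOf, pvIsS, pvIsM, pvIsL, h1, h2]

-- ===== VERDICT (by name: the statement is the Claim_ definition above) =====
theorem categorize_and_sort_tables_spec : Claim_equal_categorize_and_sort_tables := by
  intro tables ts _
  show categorize_and_sort_tables tables ts = categorize_and_sort_tables_alt tables ts
  unfold categorize_and_sort_tables categorize_and_sort_tables_alt
  simp only []
  rw [catA_eq_map tables ts, buckets_eq ts tables ([], [], [])]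
  set xs := tables.map (pvEnr ts) with hxs
  have hgood : ∀ x ∈ xs, pvGood x = true := fun x hx => good_of_mem_map hx
  -- split off the small bucket
  have hsep1 : ∀ a b, pvGood a = true → pvGood b = true → pvIsS a = true → pvIsS b = false →
      pvKeyA a < pvKeyA b := by
    intro a b ga gb pa pb
    have ha := good_small ga pa
    rw [keyA_small pa]
    rcases good_cases gb with hb | hb | hb
    · rw [hb] at pb; cases pb
    · have := good_medium gb hb; rw [keyA_medium hb]; omega
    · have := good_large gb hb; rw [keyA_large hb]; omega
  have h1 : PySem.List.sorted xs pvKeyA false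
      = PySem.List.sorted (xs.filter pvIsS) pvKeyA false
        ++ PySem.List.sorted (xs.filter (fun x => !pvIsS x)) pvKeyA false :=
    sorted_partition xs pvKeyA pvIsS pvGood hgood hsep1
  -- split the rest into medium and large
  have hgood' : ∀ x ∈ xs.filter (fun x => !pvIsS x), (pvGood x && !pvIsS x) = true := by
    intro x hx
    have h1 := hgood x (List.mem_of_mem_filter hx)
    have h2 := List.of_mem_filter hx
    simp_all
  have hsep2 : ∀ a b, (pvGood a && !pvIsS a) = true → (pvGood b && !pvIsS b) = true →
      pvIsM a = true → pvIsM b = false → pvKeyA a < pvKeyA b := by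
    intro a b ga gb pa pb
    simp only [Bool.and_eq_true, Bool.not_eq_true'] at ga gb
    have hma := good_medium ga.1 pa
    rw [keyA_medium pa]
    rcases good_cases gb.1 with hb | hb | hb
    · rw [hb] at gb; cases gb.2
    · rw [hb] at pb; cases pb
    · have := good_large gb.1 hb; rw [keyA_large hb]; omega
  have h2 : PySem.List.sorted (xs.filter (fun x => !pvIsS x)) pvKeyA false
      = PySem.List.sorted ((xs.filter (fun x => !pvIsS x)).filter pvIsM) pvKeyA false
        ++ PySem.List.sorted ((xs.filter (fun x => !pvIsS x)).filter (fun x => !pvIsM x)) pvKeyA false :=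
    sorted_partition _ pvKeyA pvIsM (fun x => pvGood x && !pvIsS x) hgood' hsep2
  -- simplify the iterated filters
  have hf1 : (xs.filter (fun x => !pvIsS x)).filter pvIsM = xs.filter pvIsM := by
    rw [List.filter_filter]
    apply List.filter_congr
    intro x _
    by_cases hm : pvIsM x = true
    · simp [hm, medium_not_small hm]
    · simp only [Bool.not_eq_true] at hm; simp [hm]
  have hf2 : (xs.filter (fun x => !pvIsS x)).filter (fun x => !pvIsM x) = xs.filter pvIsL := by
    rw [List.filter_filter]
    apply List.filter_congr
    intro x hx
    have hg := hgood x hx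
    have hc : x.2.1 = pvCatOf x.2.2 := by simpa [pvGood] using hg
    rcases good_cases hg with h | h | h <;>
      · have hstr := h
        simp only [pvIsS, pvIsM, pvIsL, beq_iff_eq] at hstr
        simp [pvIsS, pvIsM, pvIsL, hstr]
  -- within a bucket A's composite key orders exactly like the row count
  have hk1 : PySem.List.sorted (xs.filter pvIsS) pvKeyA false
      = PySem.List.sorted (xs.filter pvIsS) (fun x => x.2.2) false :=
    sorted_key_congr _ _ _ pvIsS (fun x hx => List.of_mem_filter hx)
      (fun a b pa pb => by rw [keyA_small pa, keyA_small pb])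
  have hk2 : PySem.List.sorted (xs.filter pvIsM) pvKeyA false
      = PySem.List.sorted (xs.filter pvIsM) (fun x => x.2.2) false :=
    sorted_key_congr _ _ _ pvIsM (fun x hx => List.of_mem_filter hx)
      (fun a b pa pb => by rw [keyA_medium pa, keyA_medium pb]; omega)
  have hk3 : PySem.List.sorted (xs.filter pvIsL) pvKeyA false
      = PySem.List.sorted (xs.filter pvIsL) (fun x => x.2.2) false :=
    sorted_key_congr _ _ _ pvIsL (fun x hx => List.of_mem_filter hx)
      (fun a b pa pb => by rw [keyA_large pa, keyA_large pb]; omega)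
  show PySem.List.sorted xs pvKeyA false = _
  rw [h1, h2, hf1, hf2, hk1, hk2, hk3]
  simp
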